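-- pv_equiv track=rewrite | github.com/jang1563/NegBioDB | src/negbiodb_ct/etl_classify.py | resolve_multi_label
-- ===== SOURCE A (Python) =====
-- def resolve_multi_label(
--     categories: list[str],
--     precedence: list[str] | None = None,
-- ) -> str:
--     """Pick single category using precedence ordering.
--
--     Default: safety > efficacy > pharmacokinetic > enrollment >
--     strategic > regulatory > design > other.
--     """
--     if precedence is None:
--         precedence = [
--             "safety", "efficacy", "pharmacokinetic", "enrollment",
--             "strategic", "regulatory", "design", "other",
--         ]
--     cat_set = set(categories)
--     for cat in precedence:
--         if cat in cat_set:
--             return cat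
--     return "other"
-- ===== SOURCE B (Python) =====
-- def resolve_multi_label(
--     categories: list[str],
--     precedence: list[str] | None = None,
-- ) -> str:
--     """Pick single category using precedence ordering (rank-dict formulation)."""
--     if precedence is None:
--         precedence = [
--             "safety", "efficacy", "pharmacokinetic", "enrollment",
--             "strategic", "regulatory", "design", "other",
--         ]
--     rank = {}
--     for i, p in enumerate(precedence):
--         if p not in rank:
--             rank[p] = i
--     best = None
--     best_rank = None
--     for c in categories:
--         r = rank.get(c)
--         if r is not None and (best_rank is None or r < best_rank):
--             best, best_rank = c, r
--     return best if best is not None else "other"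
-- ===== Notes on version B (the rewrite author's own statement) =====
-- stated objective: alternative
-- what changed: B inverts the traversal: instead of scanning precedence and testing membership in set(categories), it builds a rank dict (precedence entry -> first index) once and makes a single pass over categories keeping the category of minimum rank, falling back to "other".
import Mathlib
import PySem

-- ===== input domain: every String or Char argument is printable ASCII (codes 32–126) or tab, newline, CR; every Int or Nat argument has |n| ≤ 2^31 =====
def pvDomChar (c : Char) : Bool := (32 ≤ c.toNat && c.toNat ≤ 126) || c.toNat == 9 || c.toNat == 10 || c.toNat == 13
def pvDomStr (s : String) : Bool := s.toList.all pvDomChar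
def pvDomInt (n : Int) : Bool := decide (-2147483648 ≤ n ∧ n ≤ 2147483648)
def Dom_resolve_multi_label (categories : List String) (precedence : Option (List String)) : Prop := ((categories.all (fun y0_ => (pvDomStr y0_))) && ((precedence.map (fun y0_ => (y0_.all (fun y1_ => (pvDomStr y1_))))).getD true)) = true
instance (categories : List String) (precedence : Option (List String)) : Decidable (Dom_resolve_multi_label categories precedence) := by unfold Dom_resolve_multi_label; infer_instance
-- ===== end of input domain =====

-- B replaces A's scan of `precedence` with set-membership tests by one pass over
-- `categories` tracking the minimum rank in a precedence->index dict (alternative decomposition).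

-- ===== PORT A =====
def pvDefaultPrec : List String :=
  ["safety", "efficacy", "pharmacokinetic", "enrollment",
   "strategic", "regulatory", "design", "other"]

-- `for cat in precedence: if cat in cat_set: return cat` / `return "other"`
def pvALoop (catSet : PySem.Set String) : List String → String
  | [] => "other"
  | cat :: rest => if PySem.Set.contains catSet cat then cat else pvALoop catSet rest

def resolve_multi_label (categories : List String) (precedence : Option (List String)) : String :=
  let prec := precedence.getD pvDefaultPrec
  let catSet := PySem.Set.ofList categories
  pvALoop catSet prec

-- ===== PORT B =====
-- `for i, p in enumerate(precedence): if p not in rank: rank[p] = i`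
def pvBuildRank : List String → Int → PySem.Dict String Int → PySem.Dict String Int
  | [], _, d => d
  | p :: rest, i, d =>
      pvBuildRank rest (i + 1) (if PySem.Dict.contains d p then d else PySem.Dict.insert d p i)

-- `for c in categories: r = rank.get(c); if r is not None and (best_rank is None or r < best_rank): best, best_rank = c, r`
def pvBLoop (rank : PySem.Dict String Int) : List String → Option (String × Int) → Option (String × Int)
  | [], acc => acc
  | c :: rest, acc =>
      let acc' : Option (String × Int) :=
        match PySem.Dict.get? rank c with
        | some r =>
            match acc with
            | none => some (c, r)
            | some (b, br) => if r < br then some (c, r) else some (b, br)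
        | none => acc
      pvBLoop rank rest acc'

def resolve_multi_label_alt (categories : List String) (precedence : Option (List String)) : String :=
  let prec := precedence.getD pvDefaultPrec
  let rank := pvBuildRank prec 0 PySem.Dict.empty
  match pvBLoop rank categories none with
  | some (b, _) => b
  | none => "other"

-- ===== PRECONDITION & SPEC =====
def Spec_resolve_multi_label (categories : List String) (precedence : Option (List String)) (out : String) : Prop := out = resolve_multi_label_alt categories precedence
instance (categories : List String) (precedence : Option (List String)) (out : String) : Decidable (Spec_resolve_multi_label categories precedence out) := by unfold Spec_resolve_multi_label; infer_instance

-- ===== CLAIM (what is proved, stated in full; the proofs are below) =====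
def Claim_equal_resolve_multi_label : Prop := ∀ (categories : List String) (precedence : Option (List String)), Dom_resolve_multi_label categories precedence → Spec_resolve_multi_label categories precedence (resolve_multi_label categories precedence)

-- ===== LEMMAS AND PROOFS =====

-- first precedence entry that is a member of S
def pvFH (prec S : List String) : Option String :=
  prec.find? (fun p => decide (p ∈ S))

lemma pvALoop_eq_fh (cats prec : List String) :
    pvALoop (PySem.Set.ofList cats) prec = (pvFH prec cats).getD "other" := by
  induction prec with
  | nil => rfl
  | cons p rest ih =>
      by_cases hp : p ∈ cats
      · simp [pvALoop, pvFH, PySem.Set.mem_ofList, hp]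
      · simpa [pvALoop, pvFH, PySem.Set.mem_ofList, hp]
          using ih

lemma pvBuildRank_get? (prec : List String) (i : Int) (d : PySem.Dict String Int) (c : String) :
    (pvBuildRank prec i d).get? c =
      match d.get? c with
      | some v => some v
      | none => if c ∈ prec then some (i + (prec.idxOf c : Int)) else none := by
  induction prec generalizing i d with
  | nil => rcases h : d.get? c with _ | v <;> simp [pvBuildRank, h]
  | cons p rest ih =>
      rw [pvBuildRank, ih]
      by_cases hc : c = p
      · subst hc
        rcases h : d.get? c with _ | v
        · have hcont : d.contains c = false := by
            rw [PySem.Dict.contains_eq_isSome_get?, h]; rfl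
          simp [hcont, PySem.Dict.get?_insert_self, List.idxOf_cons_self]
        · have hcont : d.contains c = true := by
            rw [PySem.Dict.contains_eq_isSome_get?, h]; rfl
          simp [hcont, h]
      · have hget : (if PySem.Dict.contains d p then d else PySem.Dict.insert d p i).get? c
            = d.get? c := by
          split
          · rfl
          · rw [PySem.Dict.get?_insert]; simp [hc]
        rw [hget]
        rcases h : d.get? c with _ | v
        · by_cases hm : c ∈ rest
          · have : List.idxOf c (p :: rest) = List.idxOf c rest + 1 := by
              simp [List.idxOf_cons, Bool.cond_eq_ite, Ne.symm hc]
            simp [hm, hc, this]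
            ring
          · simp [hm, hc]
        · simp

lemma pvFH_congr (prec S T : List String) (h : ∀ p ∈ prec, (p ∈ S ↔ p ∈ T)) :
    pvFH prec S = pvFH prec T := by
  induction prec with
  | nil => rfl
  | cons q rest ih =>
      have hq := h q (by simp)
      by_cases hqs : q ∈ S
      · simp [pvFH, hqs, hq.mp hqs]
      · have hqt : q ∉ T := fun ht => hqs (hq.mpr ht)
        simpa [pvFH, hqs, hqt]
          using ih (fun p hp => h p (by simp [hp]))

lemma pvFH_of_mem (prec : List String) (c : String) (hc : c ∈ prec) (S : List String)
    (hS : c ∈ S) : ∃ x, pvFH prec S = some x ∧ x ∈ S := by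
  have : (prec.find? (fun p => decide (p ∈ S))).isSome := by
    rw [List.find?_isSome]
    exact ⟨c, hc, by simpa using hS⟩
  rcases Option.isSome_iff_exists.mp this with ⟨x, hx⟩
  exact ⟨x, hx, by simpa using List.find?_some hx⟩

lemma pvFH_singleton (prec : List String) (c : String) (hc : c ∈ prec) :
    pvFH prec [c] = some c := by
  rcases pvFH_of_mem prec c hc [c] (by simp) with ⟨x, hx, hxm⟩
  simp only [List.mem_singleton] at hxm
  rw [hx, hxm]

-- dropping a head `c` dominated (by first index in prec) by some `u` already in S
lemma pvFH_drop (prec : List String) (c u : String) (S : List String)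
    (hc : c ∈ prec) (hu : u ∈ prec) (h : prec.idxOf u ≤ prec.idxOf c) (hkeep : u ∈ S) :
    pvFH prec (c :: S) = pvFH prec S := by
  induction prec with
  | nil => rfl
  | cons q rest ih =>
      simp only [List.idxOf_cons, Bool.cond_eq_ite, beq_iff_eq] at h
      by_cases hqS : q ∈ S
      · simp [pvFH, hqS]
      · have hqu : q ≠ u := fun he => hqS (he ▸ hkeep)
        have hqc : q ≠ c := by
          intro he
          rw [if_pos he, if_neg hqu] at h
          omega
        have hc' : c ∈ rest := by
          rcases List.mem_cons.mp hc with h1 | h1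
          · exact absurd h1.symm hqc
          · exact h1
        have hu' : u ∈ rest := by
          rcases List.mem_cons.mp hu with h1 | h1
          · exact absurd h1.symm hqu
          · exact h1
        have h' : List.idxOf u rest ≤ List.idxOf c rest := by
          rw [if_neg hqu, if_neg hqc] at h
          omega
        unfold pvFH
        rw [List.find?_cons_of_neg (by simp [hqS, hqc]),
          List.find?_cons_of_neg (by simp [hqS])]
        exact ih hc' hu' h'

def pvRankOf (prec : List String) : PySem.Dict String Int :=
  pvBuildRank prec 0 PySem.Dict.empty

lemma pvRankOf_get? (prec : List String) (c : String) :
    (pvRankOf prec).get? c = if c ∈ prec then some ((prec.idxOf c : Int)) else none := by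
  rw [pvRankOf, pvBuildRank_get?]
  simp [PySem.Dict.get?_empty]

def pvAccList : Option (String × Int) → List String
  | none => []
  | some (c, _) => [c]

def pvAccOK (prec : List String) : Option (String × Int) → Prop
  | none => True
  | some (c, r) => c ∈ prec ∧ r = (prec.idxOf c : Int)

def pvBRes : Option (String × Int) → String
  | none => "other"
  | some (b, _) => b

lemma pvBLoop_spec (prec : List String) (cs : List String) :
    ∀ acc, pvAccOK prec acc →
      pvBRes (pvBLoop (pvRankOf prec) cs acc) = (pvFH prec (pvAccList acc ++ cs)).getD "other" := by
  induction cs with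
  | nil =>
      intro acc hacc
      match acc with
      | none =>
          have hnone : pvFH prec [] = none := by
            unfold pvFH
            exact List.find?_eq_none.mpr (by simp)
          simp [pvBLoop, pvBRes, pvAccList, hnone]
      | some (c0, r0) =>
          simp only [pvBLoop, pvAccList, pvBRes, List.append_nil]
          rw [pvFH_singleton prec c0 hacc.1]
          rfl
  | cons c cs ih =>
      intro acc hacc
      rw [pvBLoop]
      by_cases hc : c ∈ prec
      · rw [pvRankOf_get?, if_pos hc]
        dsimp only
        match acc, hacc with
        | none, _ =>
            simpa using ih (some (c, (prec.idxOf c : Int))) ⟨hc, rfl⟩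
        | some (c0, r0), ⟨hc0, hr0⟩ =>
            subst hr0
            dsimp only
            by_cases hlt : (prec.idxOf c : Int) < (prec.idxOf c0 : Int)
            · rw [if_pos hlt, ih (some (c, (prec.idxOf c : Int))) ⟨hc, rfl⟩]
              have : pvFH prec (c0 :: c :: cs) = pvFH prec (c :: cs) :=
                pvFH_drop prec c0 c (c :: cs) hc0 hc (by exact_mod_cast hlt.le) (by simp)
              simp [pvAccList, this]
            · rw [if_neg hlt, ih (some (c0, (prec.idxOf c0 : Int))) ⟨hc0, rfl⟩]
              have hle : prec.idxOf c0 ≤ prec.idxOf c := by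
                have := not_lt.mp hlt
                exact_mod_cast this
              have : pvFH prec (c0 :: c :: cs) = pvFH prec (c0 :: cs) := by
                have h1 : pvFH prec (c :: c0 :: cs) = pvFH prec (c0 :: cs) :=
                  pvFH_drop prec c c0 (c0 :: cs) hc hc0 hle (by simp)
                have h2 : pvFH prec (c0 :: c :: cs) = pvFH prec (c :: c0 :: cs) :=
                  pvFH_congr _ _ _ (by intro p _; constructor <;> (intro hp; simpa [or_left_comm] using hp))
                rw [h2, h1]
              simp [pvAccList, this]
      · rw [pvRankOf_get?, if_neg hc]
        rw [ih acc hacc]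
        have : pvFH prec (pvAccList acc ++ cs) = pvFH prec (pvAccList acc ++ c :: cs) := by
          apply pvFH_congr
          intro p hp
          have hpc : p ≠ c := fun he => hc (he ▸ hp)
          simp [hpc]
        rw [this]

-- ===== VERDICT (by name: the statement is the Claim_ definition above) =====
theorem resolve_multi_label_spec : Claim_equal_resolve_multi_label := by
  intro categories precedence _
  unfold Spec_resolve_multi_label resolve_multi_label resolve_multi_label_alt
  rw [pvALoop_eq_fh]
  have h := pvBLoop_spec (precedence.getD pvDefaultPrec) categories none trivial
  simp only [pvAccList, List.nil_append, pvRankOf] at h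
  rw [← h]
  cases hb : pvBLoop (pvBuildRank (precedence.getD pvDefaultPrec) 0 PySem.Dict.empty) categories none with
  | none => simp [pvBRes, hb]
  | some p => obtain ⟨b, r⟩ := p; simp [pvBRes, hb]
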